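-- pv_equiv track=rewrite | github.com/Bookah0/AOC2023 | Day7.py | get_n_cards_in_hand
-- ===== SOURCE A (Python) =====
-- from collections import defaultdict
--
-- def get_n_cards_in_hand(hand):
--     temp_dict = defaultdict(int)
--     n_jokers = 0
--
--     for suite in hand:
--         if suite != -1:
--             temp_dict[suite] += 1
--         else:
--             n_jokers += 1
--
--     return n_jokers, sorted(temp_dict.values())
-- ===== SOURCE B (Python) =====
-- def get_n_cards_in_hand(hand):
--     # sort-then-scan: run lengths of the sorted hand instead of hash counting
--     s = sorted(hand)
--     n_jokers = 0
--     counts = []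
--     i = 0
--     n = len(s)
--     while i < n:
--         j = i
--         while j < n and s[j] == s[i]:
--             j += 1
--         if s[i] == -1:
--             n_jokers = j - i
--         else:
--             counts.append(j - i)
--         i = j
--     return n_jokers, sorted(counts)
-- ===== Notes on version B (the rewrite author's own statement) =====
-- stated objective: alternative
-- what changed: B sorts the hand and scans run lengths of equal values (sort-then-group) instead of building a defaultdict counter, reading the joker count off the run of -1.
import Mathlib
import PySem

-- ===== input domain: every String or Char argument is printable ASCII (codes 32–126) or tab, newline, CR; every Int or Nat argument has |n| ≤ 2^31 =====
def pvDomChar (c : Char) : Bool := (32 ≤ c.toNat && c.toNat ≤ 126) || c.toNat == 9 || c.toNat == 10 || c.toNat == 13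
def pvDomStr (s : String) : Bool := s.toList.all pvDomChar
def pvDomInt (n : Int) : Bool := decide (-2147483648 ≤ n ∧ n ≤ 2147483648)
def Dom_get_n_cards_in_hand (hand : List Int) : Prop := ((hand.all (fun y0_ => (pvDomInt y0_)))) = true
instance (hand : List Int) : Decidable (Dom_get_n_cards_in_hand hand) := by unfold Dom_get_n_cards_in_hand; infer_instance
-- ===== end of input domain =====

-- B replaces A's defaultdict counting with a sort-then-scan over run lengths of the sorted hand (alternative decomposition, same result).

-- ===== PORT A =====
def get_n_cards_in_hand (hand : List Int) : Int × List Int :=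
  let st := hand.foldl
    (fun (st : PySem.Dict Int Int × Int) suite =>
      if suite ≠ -1 then (st.1.insert suite (st.1.getD suite 0 + 1), st.2)
      else (st.1, st.2 + 1))
    (PySem.Dict.empty, 0)
  (st.2, PySem.List.sorted st.1.values (fun x => x) false)

-- ===== PORT B =====
-- the inner 'while j < n and s[j] == s[i]' scan of one run: the run is the leading
-- block of elements equal to the head, and the outer loop resumes after it
def runLengths : List Int → List (Int × Int)
  | [] => []
  | x :: xs =>
    (x, ((xs.takeWhile (· == x)).length : Int) + 1) :: runLengths (xs.dropWhile (· == x))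
  termination_by l => l.length
  decreasing_by
    simpa using Nat.lt_succ_of_le (List.length_dropWhile_le (· == x) xs)

def get_n_cards_in_hand_alt (hand : List Int) : Int × List Int :=
  let s := PySem.List.sorted hand (fun x => x) false
  let st := (runLengths s).foldl
    (fun (acc : Int × List Int) p =>
      if p.1 = -1 then (p.2, acc.2) else (acc.1, acc.2 ++ [p.2]))
    (0, [])
  (st.1, PySem.List.sorted st.2 (fun x => x) false)

-- ===== PRECONDITION & SPEC =====
def Spec_get_n_cards_in_hand (hand : List Int) (out : Int × List Int) : Prop := out = get_n_cards_in_hand_alt hand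
instance (hand : List Int) (out : Int × List Int) : Decidable (Spec_get_n_cards_in_hand hand out) := by unfold Spec_get_n_cards_in_hand; infer_instance

-- ===== CLAIM (what is proved, stated in full; the proofs are below) =====
def Claim_equal_get_n_cards_in_hand : Prop := ∀ (hand : List Int), Dom_get_n_cards_in_hand hand → Spec_get_n_cards_in_hand hand (get_n_cards_in_hand hand)

-- ===== LEMMAS AND PROOFS =====

-- A's loop: the dict is the counter of the non-joker cards, the second component counts the -1s
theorem aFold_eq (hand : List Int) (d : PySem.Dict Int Int) (j : Int) :
    hand.foldl
      (fun (st : PySem.Dict Int Int × Int) suite =>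
        if suite ≠ -1 then (st.1.insert suite (st.1.getD suite 0 + 1), st.2)
        else (st.1, st.2 + 1)) (d, j)
    = ((hand.filter (fun x => x ≠ -1)).foldl
         (fun d x => d.insert x (d.getD x 0 + 1)) d,
       j + (hand.count (-1) : Int)) := by
  induction hand generalizing d j with
  | nil => simp
  | cons a l ih =>
    simp only [List.foldl_cons]
    by_cases ha : a = -1
    · rw [if_neg (by simp [ha]), ih]
      have h1 : (a :: l).count (-1) = l.count (-1) + 1 := by simp [ha]
      have h2 : (a :: l).filter (fun x => x ≠ -1) = l.filter (fun x => x ≠ -1) := by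
        simp [ha]
      rw [h1, h2]
      refine Prod.ext rfl ?_
      push_cast; ring
    · rw [if_pos ha, ih]
      have h1 : (a :: l).count (-1) = l.count (-1) := by simp [ha]
      have h2 : (a :: l).filter (fun x => x ≠ -1) = a :: l.filter (fun x => x ≠ -1) := by
        simp [ha]
      rw [h1, h2]
      simp

-- every value recorded by runLengths comes from the list
theorem runLengths_fst_mem (s : List Int) : ∀ p ∈ runLengths s, p.1 ∈ s := by
  induction s using runLengths.induct with
  | case1 => simp [runLengths]
  | case2 x xs ih =>
    intro p hp
    rw [runLengths, List.mem_cons] at hp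
    rcases hp with rfl | hp
    · simp
    · exact List.mem_cons_of_mem _ ((List.dropWhile_sublist _).mem (ih p hp))

-- facts about one run of a weakly increasing list
theorem run_facts (x : Int) (xs : List Int) (hs : (x :: xs).Pairwise (· ≤ ·)) :
    (∀ v ∈ xs.dropWhile (· == x), x < v)
    ∧ (x :: xs).count x = (xs.takeWhile (· == x)).length + 1 := by
  have hx : ∀ v ∈ xs, x ≤ v := (List.pairwise_cons.mp hs).1
  have hxs := List.takeWhile_append_dropWhile (p := (· == x)) (l := xs)
  have hlt : ∀ v ∈ xs.dropWhile (· == x), x < v := by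
    cases hr : xs.dropWhile (· == x) with
    | nil => simp
    | cons h t =>
      have hh : h ≠ x := by
        have := List.head_dropWhile_not (p := (· == x)) (l := xs) (by simp [hr])
        simpa [hr] using this
      have hhx : x < h := by
        have : x ≤ h := hx h (by
          have : h ∈ xs.dropWhile (· == x) := by simp [hr]
          exact (List.dropWhile_sublist _).mem this)
        exact lt_of_le_of_ne this (Ne.symm hh)
      have hpt : (h :: t).Pairwise (· ≤ ·) := by
        rw [← hr]
        exact (List.Pairwise.sublist (List.dropWhile_sublist _) (List.pairwise_cons.mp hs).2)
      intro v hv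
      rcases List.mem_cons.mp hv with rfl | hv
      · exact hhx
      · exact lt_of_lt_of_le hhx ((List.pairwise_cons.mp hpt).1 v hv)
  refine ⟨hlt, ?_⟩
  have hct : (xs.takeWhile (· == x)).count x = (xs.takeWhile (· == x)).length := by
    apply List.count_eq_length.mpr
    intro v hv
    exact ((by simpa using List.mem_takeWhile_imp hv : v = x)).symm
  have hcr : (xs.dropWhile (· == x)).count x = 0 := by
    apply List.count_eq_zero.mpr
    intro hmem
    exact absurd rfl (ne_of_gt (hlt x hmem))
  have hxcnt : xs.count x = (xs.takeWhile (· == x)).length := by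
    conv_lhs => rw [← hxs]
    rw [List.count_append, hct, hcr]
    omega
  rw [List.count_cons_self, hxcnt]

-- run lengths of a weakly increasing list: every recorded pair is (v, how often v occurs)
theorem runLengths_snd (s : List Int) (hs : s.Pairwise (· ≤ ·)) :
    ∀ p ∈ runLengths s, p.2 = (s.count p.1 : Int) := by
  induction s using runLengths.induct with
  | case1 => simp [runLengths]
  | case2 x xs ih =>
    obtain ⟨hlt, hcnt⟩ := run_facts x xs hs
    intro p hp
    rw [runLengths, List.mem_cons] at hp
    rcases hp with rfl | hp
    · simp [hcnt]
    · have hr : (xs.dropWhile (· == x)).Pairwise (· ≤ ·) :=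
        List.Pairwise.sublist (List.dropWhile_sublist _) (List.pairwise_cons.mp hs).2
      have h1 := ih hr p hp
      have hp1 : p.1 ∈ xs.dropWhile (· == x) := runLengths_fst_mem _ p hp
      have hne : p.1 ≠ x := ne_of_gt (hlt _ hp1)
      have hct : (xs.takeWhile (· == x)).count p.1 = 0 := by
        apply List.count_eq_zero.mpr
        intro hmem
        exact hne (by simpa using List.mem_takeWhile_imp hmem)
      have hcc : (x :: xs).count p.1 = (xs.dropWhile (· == x)).count p.1 := by
        conv_lhs => rw [show xs = xs.takeWhile (· == x) ++ xs.dropWhile (· == x) from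
          (List.takeWhile_append_dropWhile).symm]
        rw [List.count_cons, List.count_append, hct]
        simp [hne.symm]
      rw [hcc]
      exact h1

-- the firsts of the run list are exactly the distinct values, without repetition
theorem runLengths_fst_nodup (s : List Int) (hs : s.Pairwise (· ≤ ·)) :
    ((runLengths s).map Prod.fst).Nodup := by
  induction s using runLengths.induct with
  | case1 => simp [runLengths]
  | case2 x xs ih =>
    obtain ⟨hlt, -⟩ := run_facts x xs hs
    have hr : (xs.dropWhile (· == x)).Pairwise (· ≤ ·) :=
      List.Pairwise.sublist (List.dropWhile_sublist _) (List.pairwise_cons.mp hs).2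
    rw [runLengths]
    simp only [List.map_cons, List.nodup_cons]
    refine ⟨?_, ih hr⟩
    intro hmem
    rcases List.mem_map.mp hmem with ⟨p, hp, hpx⟩
    have := hlt p.1 (runLengths_fst_mem _ p hp)
    rw [hpx] at this
    exact lt_irrefl x this

theorem mem_runLengths_fst (s : List Int) (hs : s.Pairwise (· ≤ ·)) (v : Int) :
    v ∈ (runLengths s).map Prod.fst ↔ v ∈ s := by
  induction s using runLengths.induct with
  | case1 => simp [runLengths]
  | case2 x xs ih =>
    have hr : (xs.dropWhile (· == x)).Pairwise (· ≤ ·) :=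
      List.Pairwise.sublist (List.dropWhile_sublist _) (List.pairwise_cons.mp hs).2
    have htx : ∀ w ∈ xs.takeWhile (· == x), w = x := by
      intro w hw; simpa using List.mem_takeWhile_imp hw
    rw [runLengths]
    simp only [List.map_cons, List.mem_cons, ih hr]
    constructor
    · rintro (rfl | h)
      · simp
      · exact Or.inr ((List.dropWhile_sublist _).mem h)
    · rintro (rfl | h)
      · exact Or.inl rfl
      · conv at h => rw [show xs = xs.takeWhile (· == x) ++ xs.dropWhile (· == x) from
          (List.takeWhile_append_dropWhile).symm]
        rcases List.mem_append.mp h with h | h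
        · exact Or.inl (htx v h)
        · exact Or.inr h

-- B's loop splits into its two components
theorem bFold_proj (l : List (Int × Int)) (a : Int) (ys : List Int) :
    l.foldl (fun (acc : Int × List Int) p =>
        if p.1 = -1 then (p.2, acc.2) else (acc.1, acc.2 ++ [p.2])) (a, ys)
    = (l.foldl (fun (a : Int) p => if p.1 = -1 then p.2 else a) a,
       ys ++ (l.filter (fun p => p.1 ≠ -1)).map Prod.snd) := by
  induction l generalizing a ys with
  | nil => simp
  | cons p l ih =>
    by_cases hp : p.1 = -1 <;> simp [hp, ih]

-- the joker fold is untouched when no run has value -1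
theorem jFold_const (l : List (Int × Int)) (a : Int) (h : ∀ p ∈ l, p.1 ≠ -1) :
    l.foldl (fun (a : Int) p => if p.1 = -1 then p.2 else a) a = a := by
  induction l generalizing a with
  | nil => rfl
  | cons p l ih =>
    have hp := h p (by simp)
    simp only [List.foldl_cons, if_neg hp]
    exact ih a (fun q hq => h q (List.mem_cons_of_mem _ hq))

-- with distinct run values, the joker fold returns the -1 run's length when present
theorem jFold_value (l : List (Int × Int)) (a c : Int)
    (hnd : (l.map Prod.fst).Nodup) (hc : ∀ p ∈ l, p.1 = -1 → p.2 = c)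
    (hmem : -1 ∈ l.map Prod.fst) :
    l.foldl (fun (a : Int) p => if p.1 = -1 then p.2 else a) a = c := by
  induction l generalizing a with
  | nil => simp at hmem
  | cons p l ih =>
    simp only [List.map_cons, List.nodup_cons] at hnd
    by_cases hp : p.1 = -1
    · simp only [List.foldl_cons, if_pos hp]
      rw [jFold_const l _ ?_]
      · exact hc p (by simp) hp
      · intro q hq hq1
        refine hnd.1 ?_
        rw [hp, ← hq1]
        exact List.mem_map_of_mem hq
    · simp only [List.foldl_cons, if_neg hp]
      refine ih a hnd.2 (fun q hq => hc q (List.mem_cons_of_mem _ hq)) ?_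
      simp only [List.map_cons, List.mem_cons] at hmem
      rcases hmem with h | h
      · exact absurd h.symm hp
      · exact h

-- ===== VERDICT (by name: the statement is the Claim_ definition above) =====
theorem get_n_cards_in_hand_spec : Claim_equal_get_n_cards_in_hand := by
  intro hand _
  unfold Spec_get_n_cards_in_hand get_n_cards_in_hand get_n_cards_in_hand_alt
  simp only []
  rw [aFold_eq, bFold_proj]
  have hperm : (PySem.List.sorted hand (fun x => x) false).Perm hand :=
    PySem.List.sorted_perm hand (fun x => x) false
  have hpair : (PySem.List.sorted hand (fun x => x) false).Pairwise (· ≤ ·) :=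
    PySem.List.sorted_pairwise hand (fun x => x)
  set s := PySem.List.sorted hand (fun x => x) false with hsdef
  refine Prod.ext ?_ ?_
  · -- joker counts agree
    simp only []
    by_cases hm : (-1 : Int) ∈ hand
    · rw [jFold_value (runLengths s) 0 ((s.count (-1) : Int))
        (runLengths_fst_nodup s hpair)
        (fun p hp hp1 => by rw [runLengths_snd s hpair p hp, hp1])
        ((mem_runLengths_fst s hpair (-1)).mpr (hperm.mem_iff.mpr hm))]
      rw [hperm.count_eq]
      ring
    · rw [jFold_const (runLengths s) 0
        (fun p hp h1 => hm (hperm.mem_iff.mp (h1 ▸ runLengths_fst_mem s p hp)))]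
      rw [List.count_eq_zero_of_not_mem hm]
      simp
  · -- sorted count lists agree
    simp only [List.nil_append]
    rw [PySem.Dict.foldl_insert_getD_add_one_eq_counter]
    have hvals : (PySem.Dict.counter (hand.filter (fun x => x ≠ -1))).values
        = (PySem.Set.ofList (hand.filter (fun x => x ≠ -1))).map
            (fun k => ((hand.filter (fun x => x ≠ -1)).count k : Int)) := by
      show (PySem.Dict.counter (hand.filter (fun x => x ≠ -1))).items.map Prod.snd = _
      rw [PySem.Dict.items_counter]
      rw [List.map_map]
      rfl
    rw [hvals]
    have hA : (PySem.Set.ofList (hand.filter (fun x => x ≠ -1))).map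
            (fun k => ((hand.filter (fun x => x ≠ -1)).count k : Int))
        = (PySem.Set.ofList (hand.filter (fun x => x ≠ -1))).map
            (fun k => (hand.count k : Int)) := by
      apply List.map_congr_left
      intro k hk
      have hk' : k ∈ hand.filter (fun x => x ≠ -1) := (PySem.Set.mem_ofList _ _).mp hk
      have hkne : (fun x => decide (x ≠ -1)) k = true := (List.mem_filter.mp hk').2
      norm_cast
      exact List.count_filter hkne
    rw [hA]
    have hB : ((runLengths s).filter (fun p => p.1 ≠ -1)).map Prod.snd
        = (((runLengths s).map Prod.fst).filter (fun k => k ≠ -1)).map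
            (fun k => (hand.count k : Int)) := by
      have h1 : ((runLengths s).filter (fun p => p.1 ≠ -1)).map Prod.snd
          = ((runLengths s).filter (fun p => p.1 ≠ -1)).map
              (fun p => (hand.count p.1 : Int)) := by
        apply List.map_congr_left
        intro p hp
        rw [runLengths_snd s hpair p (List.mem_of_mem_filter hp), hperm.count_eq]
      rw [h1]
      rw [show (((runLengths s).map Prod.fst).filter (fun k => k ≠ -1))
          = ((runLengths s).filter (fun p => p.1 ≠ -1)).map Prod.fst from by
        rw [List.filter_map]; rfl]
      rw [List.map_map]
      rfl
    rw [hB]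
    apply (PySem.List.sorted_id_eq_sorted_id_iff_perm _ _).mpr
    apply List.Perm.map
    apply (List.perm_ext_iff_of_nodup ?_ ?_).mpr
    · intro k
      rw [PySem.Set.mem_ofList _ _, List.mem_filter, List.mem_filter,
        mem_runLengths_fst s hpair, hperm.mem_iff]
    · exact PySem.Set.nodup_ofList _
    · exact (runLengths_fst_nodup s hpair).filter _
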